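-- pv_equiv track=rewrite | github.com/classroom-dee/codingProblems | Python3/프로그래머스/2/72411. 메뉴 리뉴얼/메뉴 리뉴얼.py | solution
-- ===== SOURCE A (Python) =====
-- from collections import Counter
-- from itertools import combinations
--
-- def solution(orders, course):
--     res = []
--     for c in course:
--         cnt = Counter()
--         for o in orders:
--             if len(o) >= c:
--                 comb = combinations(sorted(o), c)
--                 cnt.update(comb)
--         max_count = max(cnt.values(), default=0)
--         if max_count > 1:
--             res += [''.join(k) for k, v in cnt.items() if v == max_count]
--     return sorted(res)
-- ===== SOURCE B (Python) =====
-- from itertools import combinations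
--
--
-- def solution(orders, course):
--     # Sort-then-scan instead of hash counting: for each course size, pour all
--     # candidate combination strings into one list, sort it, and find the most
--     # frequent candidates by a run-length scan over the sorted list (no Counter).
--     res = []
--     for c in course:
--         pool = []
--         for o in orders:
--             if len(o) >= c:
--                 pool.extend(''.join(t) for t in combinations(sorted(o), c))
--         pool.sort()
--         best = 0
--         winners = []
--         i = 0
--         while i < len(pool):
--             j = i
--             while j < len(pool) and pool[j] == pool[i]:
--                 j += 1
--             run = j - i
--             if run > best:
--                 best, winners = run, [pool[i]]
--             elif run == best:
--                 winners.append(pool[i])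
--             i = j
--         if best > 1:
--             res.extend(winners)
--     return sorted(res)
-- ===== Notes on version B (the rewrite author's own statement) =====
-- stated objective: alternative
-- what changed: A counts combinations with a hash Counter per course size and reads winners from the map; B uses no map at all: it pours all candidate combination strings into one list, sorts it, and finds the maximal-frequency candidates by a run-length scan over the sorted list.
import Mathlib
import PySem

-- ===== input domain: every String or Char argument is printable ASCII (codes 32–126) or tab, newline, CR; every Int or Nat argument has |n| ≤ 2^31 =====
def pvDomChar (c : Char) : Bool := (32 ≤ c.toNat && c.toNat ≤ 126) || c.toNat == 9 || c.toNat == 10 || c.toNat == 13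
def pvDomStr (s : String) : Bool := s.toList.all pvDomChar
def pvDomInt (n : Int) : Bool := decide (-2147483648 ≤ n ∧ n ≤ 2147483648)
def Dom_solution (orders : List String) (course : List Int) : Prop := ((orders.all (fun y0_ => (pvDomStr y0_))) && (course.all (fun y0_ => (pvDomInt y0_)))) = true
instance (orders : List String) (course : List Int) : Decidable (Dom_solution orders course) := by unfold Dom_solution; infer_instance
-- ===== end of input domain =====

-- B replaces A's hash-Counter counting by sort-then-scan: all candidate combination
-- strings of one course size go into one list, which is sorted and swept by a
-- run-length scan that keeps the maximal-frequency candidates; objective: alternative.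

-- shared library pieces (Python's sorted(o) and combinations(·, c))
def pvSortedChars (o : String) : List Char := PySem.List.sorted o.toList (fun x => x) false
-- c.toNat is only reached under the guard len(o) >= c, and Pre_ admits a negative c
-- only with orders = [] (Python's combinations raises ValueError on negative r)
def pvCombos (o : String) (c : Int) : List (List Char) :=
  PySem.List.combinations (pvSortedChars o) c.toNat

-- ===== PORT A =====
-- Counter.update over one order's combinations
def pvCounterUpdate (cnt : PySem.Dict (List Char) Int) (ks : List (List Char)) :
    PySem.Dict (List Char) Int :=
  ks.foldl (fun d k => d.modify k 0 (· + 1)) cnt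

def solution (orders : List String) (course : List Int) : List String :=
  let res := course.foldl (fun res c =>
    let cnt := orders.foldl (fun cnt o =>
      if c ≤ PySem.Str.len o then pvCounterUpdate cnt (pvCombos o c) else cnt)
      PySem.Dict.empty
    let maxCount := (PySem.List.max? cnt.values (fun v => v)).getD 0
    if 1 < maxCount then
      res ++ (cnt.items.filter (fun kv => kv.2 == maxCount)).map (fun kv => String.ofList kv.1)
    else res) []
  PySem.List.sorted res (fun x => x) false

-- ===== PORT B =====
-- the two while loops: advance j over the run of pool[i], update (best, winners), i = j
def scanRuns : List String → Int → List String → Int × List String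
  | [], best, winners => (best, winners)
  | t :: rest, best, winners =>
    let pre := rest.takeWhile (fun x => x == t)
    let post := rest.dropWhile (fun x => x == t)
    let run : Int := 1 + pre.length
    if best < run then scanRuns post run [t]
    else if run = best then scanRuns post best (winners ++ [t])
    else scanRuns post best winners
termination_by pool => pool.length
decreasing_by
  all_goals simpa using Nat.lt_succ_of_le (List.length_dropWhile_le _ _)

def solution_alt (orders : List String) (course : List Int) : List String :=
  let res := course.foldl (fun res c =>
    let pool := orders.foldl (fun pool o =>
      if c ≤ PySem.Str.len o then pool ++ (pvCombos o c).map String.ofList else pool) []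
    let spool := PySem.List.sorted pool (fun x => x) false
    let bw := scanRuns spool 0 []
    if 1 < bw.1 then res ++ bw.2 else res) []
  PySem.List.sorted res (fun x => x) false

-- ===== PRECONDITION & SPEC =====
-- Pre_ excludes only inputs where the Python raises: with orders nonempty, a negative
-- course size reaches combinations(..., c), which raises ValueError (in A and in B).
def Pre_solution (orders : List String) (course : List Int) : Prop :=
  orders = [] ∨ ∀ c ∈ course, 0 ≤ c
instance (orders : List String) (course : List Int) : Decidable (Pre_solution orders course) := by unfold Pre_solution; infer_instance
def pvWitness_solution : List String × List Int := (["ABC", "CBA"], [2])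

def Spec_solution (orders : List String) (course : List Int) (out : List String) : Prop := out = solution_alt orders course
instance (orders : List String) (course : List Int) (out : List String) : Decidable (Spec_solution orders course out) := by unfold Spec_solution; infer_instance

-- ===== CLAIM (what is proved, stated in full; the proofs are below) =====
def Claim_equal_solution : Prop := ∀ (orders : List String) (course : List Int), Dom_solution orders course → Pre_solution orders course → Spec_solution orders course (solution orders course)

-- ===== LEMMAS AND PROOFS =====

-- the candidate pool of one course size, at tuple (List Char) level
def pvFlat (orders : List String) (c : Int) : List (List Char) :=
  (orders.filter (fun o => c ≤ PySem.Str.len o)).flatMap (fun o => pvCombos o c)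

-- maximal count over a string pool, the winner list at that count, and the emitted block
def pvMax (s : List String) : Int :=
  ((PySem.List.dedup s).map (fun k => (List.count k s : Int))).foldl max 0
def pvWin (s : List String) : List String :=
  (PySem.List.dedup s).filter (fun k => (List.count k s : Int) == pvMax s)
def pvEmit (s : List String) : List String :=
  if 1 < pvMax s then pvWin s else []

-- what scanRuns computes from an arbitrary starting state
def pvSpec (s : List String) (best : Int) (winners : List String) : Int × List String :=
  (((PySem.List.dedup s).map (fun k => (List.count k s : Int))).foldl max best,
   (if best = ((PySem.List.dedup s).map (fun k => (List.count k s : Int))).foldl max best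
    then winners else [])
    ++ (PySem.List.dedup s).filter
        (fun k => (List.count k s : Int)
          == ((PySem.List.dedup s).map (fun k => (List.count k s : Int))).foldl max best))

-- B's per-size block (named so the loop body can be rewritten)
def pvEmitB (orders : List String) (c : Int) : List String :=
  let pool := orders.foldl (fun pool o =>
    if c ≤ PySem.Str.len o then pool ++ (pvCombos o c).map String.ofList else pool) []
  let spool := PySem.List.sorted pool (fun x => x) false
  let bw := scanRuns spool 0 []
  if 1 < bw.1 then bw.2 else []

lemma pv_ofList_injective : Function.Injective String.ofList := by
  intro a b h
  have := congrArg String.toList h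
  simpa using this

-- Set.add-accumulator lemmas for first-occurrence dedup
lemma pv_foldl_add_const (pre : List String) (t : String) (s : List String)
    (hpre : ∀ x ∈ pre, x = t) (ht : t ∈ s) :
    pre.foldl PySem.Set.add s = s := by
  induction pre with
  | nil => rfl
  | cons x xs ih =>
    have hx : x = t := hpre x (List.mem_cons_self)
    have hxs : x ∈ s := hx ▸ ht
    have hadd : PySem.Set.add s x = s := by
      simp [PySem.Set.add, PySem.Set.contains, hxs]
    rw [List.foldl_cons, hadd]
    exact ih (fun y hy => hpre y (List.mem_cons_of_mem _ hy))

lemma pv_foldl_add_append (s : List String) (l : List String) (h : ∀ x ∈ l, x ∉ s) :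
    ∀ u : List String, l.foldl PySem.Set.add (s ++ u) = s ++ l.foldl PySem.Set.add u := by
  induction l with
  | nil => intro u; rfl
  | cons x xs ih =>
    intro u
    have hx : x ∉ s := h x (List.mem_cons_self)
    have hmem : ((s ++ u).contains x = true) ↔ (u.contains x = true) := by
      simp [hx]
    have hstep : PySem.Set.add (s ++ u) x = s ++ PySem.Set.add u x := by
      unfold PySem.Set.add
      split_ifs with h1 h2 <;> simp_all [List.append_assoc]
    rw [List.foldl_cons, hstep]
    exact ih (fun y hy => h y (List.mem_cons_of_mem _ hy)) _

-- dedup of a run-headed list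
lemma pv_dedup_run (t : String) (pre post : List String)
    (hpre : ∀ x ∈ pre, x = t) (hpost : t ∉ post) :
    PySem.List.dedup (t :: (pre ++ post)) = t :: PySem.List.dedup post := by
  have hat : PySem.Set.add [] t = [t] := rfl
  rw [PySem.List.dedup_eq_ofList, PySem.Set.ofList_eq_foldl, List.foldl_cons]
  show (pre ++ post).foldl PySem.Set.add (PySem.Set.add [] t) = _
  rw [hat, List.foldl_append, pv_foldl_add_const pre t [t] hpre (by simp)]
  have hpost' : ∀ x ∈ post, x ∉ ([t] : List String) := by
    intro x hx hmem
    have : x = t := by simpa using hmem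
    exact hpost (this ▸ hx)
  have h2 := pv_foldl_add_append [t] post hpost' []
  rw [List.append_nil] at h2
  rw [h2, PySem.List.dedup_eq_ofList, PySem.Set.ofList_eq_foldl]
  rfl

-- dedup commutes with the injective map String.ofList
lemma pv_foldl_add_map (l : List (List Char)) :
    ∀ acc : List (List Char),
      (l.map String.ofList).foldl PySem.Set.add (acc.map String.ofList)
        = (l.foldl PySem.Set.add acc).map String.ofList := by
  induction l with
  | nil => intro acc; rfl
  | cons x xs ih =>
    intro acc
    have hmem : (String.ofList x ∈ acc.map String.ofList) ↔ x ∈ acc := by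
      constructor
      · intro h
        rcases List.mem_map.mp h with ⟨y, hy, he⟩
        exact (pv_ofList_injective he) ▸ hy
      · intro h
        exact List.mem_map_of_mem h
    have hstep : PySem.Set.add (acc.map String.ofList) (String.ofList x)
        = (PySem.Set.add acc x).map String.ofList := by
      unfold PySem.Set.add
      split_ifs with h1 h2 <;> simp_all
    rw [List.map_cons, List.foldl_cons, List.foldl_cons, hstep, ih]

lemma pv_dedup_map (l : List (List Char)) :
    PySem.List.dedup (l.map String.ofList) = (PySem.List.dedup l).map String.ofList := by
  have := pv_foldl_add_map l []
  simpa [PySem.List.dedup_eq_ofList, PySem.Set.ofList_eq_foldl] using this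

-- a running max is invariant under permutation (by antisymmetry)
lemma pv_foldl_max_perm (l l' : List Int) (h : l.Perm l') (a : Int) :
    l.foldl max a = l'.foldl max a := by
  have hle : ∀ (u v : List Int), u.Perm v → u.foldl max a ≤ v.foldl max a := by
    intro u v huv
    rcases PySem.List.foldl_max_mem u a with he | hm
    · rw [he]; exact (PySem.List.le_foldl_max v a).1
    · exact (PySem.List.le_foldl_max v a).2 _ (huv.mem_iff.mp hm)
  exact le_antisymm (hle l l' h) (hle l' l h.symm)

lemma pv_dedup_perm (s s' : List String) (h : s.Perm s') :
    (PySem.List.dedup s).Perm (PySem.List.dedup s') := by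
  rw [List.perm_ext_iff_of_nodup (PySem.List.nodup_dedup s) (PySem.List.nodup_dedup s')]
  intro a
  rw [PySem.List.mem_dedup, PySem.List.mem_dedup]
  exact h.mem_iff

-- pvMax / pvEmit respect permutation of the pool
lemma pv_max_perm (s s' : List String) (h : s.Perm s') : pvMax s = pvMax s' := by
  unfold pvMax
  have hc : (PySem.List.dedup s).map (fun k => (List.count k s : Int))
      = (PySem.List.dedup s).map (fun k => (List.count k s' : Int)) :=
    List.map_congr_left (fun k _ => by rw [h.count_eq])
  rw [hc]
  exact pv_foldl_max_perm _ _ ((pv_dedup_perm s s' h).map _) 0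

lemma pv_emit_perm (s s' : List String) (h : s.Perm s') : (pvEmit s).Perm (pvEmit s') := by
  unfold pvEmit
  rw [pv_max_perm s s' h]
  split_ifs with hc
  · unfold pvWin
    rw [pv_max_perm s s' h]
    have h1 : (PySem.List.dedup s).filter (fun k => (List.count k s : Int) == pvMax s')
        = (PySem.List.dedup s).filter (fun k => (List.count k s' : Int) == pvMax s') :=
      List.filter_congr (fun x _ => by rw [h.count_eq])
    rw [h1]
    exact (pv_dedup_perm s s' h).filter _
  · exact List.Perm.refl []

-- one group step of the scan
lemma pv_scan_step (t : String) (rest pre post : List String) (b : Int) (w : List String)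
    (hcnt_k : ∀ k, k ≠ t → List.count k (t :: rest) = List.count k post)
    (hdedup : PySem.List.dedup (t :: rest) = t :: PySem.List.dedup post)
    (hcnt_t : (List.count t (t :: rest) : Int) = 1 + (pre.length : Int))
    (hknot : ∀ k ∈ PySem.List.dedup post, k ≠ t)
    (hIH : ∀ (b' : Int) (w' : List String), scanRuns post b' w' = pvSpec post b' w') :
    (if b < 1 + (pre.length : Int) then scanRuns post (1 + (pre.length : Int)) [t]
     else if 1 + (pre.length : Int) = b then scanRuns post b (w ++ [t])
     else scanRuns post b w)
      = pvSpec (t :: rest) b w := by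
  have hmap : ∀ b', ((PySem.List.dedup (t :: rest)).map
        (fun k => (List.count k (t :: rest) : Int))).foldl max b'
      = ((PySem.List.dedup post).map (fun k => (List.count k post : Int))).foldl max
          (max b' (1 + (pre.length : Int))) := by
    intro b'
    rw [hdedup, List.map_cons, hcnt_t, List.foldl_cons,
      List.map_congr_left (fun k hk => by rw [hcnt_k k (hknot k hk)])]
  have hfilter : ∀ X : Int, (PySem.List.dedup (t :: rest)).filter
        (fun k => (List.count k (t :: rest) : Int) == X)
      = (if ((1 + (pre.length : Int)) == X)
          then t :: (PySem.List.dedup post).filter (fun k => (List.count k post : Int) == X)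
          else (PySem.List.dedup post).filter (fun k => (List.count k post : Int) == X)) := by
    intro X
    rw [hdedup, List.filter_cons,
      List.filter_congr (fun k hk => by rw [hcnt_k k (hknot k hk)]), hcnt_t]
  have hbase := PySem.List.le_foldl_max
    ((PySem.List.dedup post).map (fun k => (List.count k post : Int)))
  unfold pvSpec
  by_cases h1 : b < 1 + (pre.length : Int)
  · rw [if_pos h1, hIH (1 + (pre.length : Int)) [t]]
    unfold pvSpec
    rw [hmap b, max_eq_right (le_of_lt h1), hfilter]
    have hbne : b ≠ ((PySem.List.dedup post).map (fun k => (List.count k post : Int))).foldl max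
        (1 + (pre.length : Int)) :=
      ne_of_lt (lt_of_lt_of_le h1 (hbase (1 + (pre.length : Int))).1)
    rw [if_neg hbne]
    by_cases hrm : (1 + (pre.length : Int))
        = ((PySem.List.dedup post).map (fun k => (List.count k post : Int))).foldl max
            (1 + (pre.length : Int))
    · rw [if_pos hrm, if_pos (beq_iff_eq.mpr hrm), List.nil_append, List.singleton_append]
    · rw [if_neg hrm, if_neg (fun h => hrm (beq_iff_eq.mp h))]
  · rw [if_neg h1]
    by_cases h2 : (1 + (pre.length : Int)) = b
    · rw [if_pos h2, hIH b (w ++ [t])]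
      unfold pvSpec
      rw [hmap b, max_eq_left (le_of_not_gt h1), hfilter]
      by_cases hb : b
          = ((PySem.List.dedup post).map (fun k => (List.count k post : Int))).foldl max b
      · have he : (1 + (pre.length : Int))
            = ((PySem.List.dedup post).map (fun k => (List.count k post : Int))).foldl max b := by
          rw [h2]; exact hb
        rw [if_pos hb, if_pos hb, if_pos (beq_iff_eq.mpr he),
          List.append_assoc, List.singleton_append]
      · have he : ¬ (1 + (pre.length : Int))
            = ((PySem.List.dedup post).map (fun k => (List.count k post : Int))).foldl max b := by
          rw [h2]; exact hb
        rw [if_neg hb, if_neg hb, if_neg (fun h => he (beq_iff_eq.mp h))]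
    · rw [if_neg h2, hIH b w]
      unfold pvSpec
      rw [hmap b, max_eq_left (le_of_not_gt h1), hfilter]
      have hrb : (1 + (pre.length : Int)) < b := lt_of_le_of_ne (le_of_not_gt h1) h2
      have hrne : ¬ (1 + (pre.length : Int))
          = ((PySem.List.dedup post).map (fun k => (List.count k post : Int))).foldl max b :=
        ne_of_lt (lt_of_lt_of_le hrb (hbase b).1)
      rw [if_neg (fun h => hrne (beq_iff_eq.mp h))]

-- the run-length scan on a pairwise-≤ list computes the max count and its winners
lemma pv_scanRuns_aux (n : Nat) : ∀ (s : List String), s.length ≤ n → s.Pairwise (· ≤ ·) →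
    ∀ (best : Int) (winners : List String), scanRuns s best winners = pvSpec s best winners := by
  induction n with
  | zero =>
    intro s hl _ b w
    have hs : s = [] := List.eq_nil_of_length_eq_zero (Nat.le_zero.mp hl)
    subst hs
    simp [scanRuns, pvSpec, PySem.List.dedup_eq_ofList, PySem.Set.ofList_eq_foldl]
  | succ n ih =>
    intro s hl hp b w
    match s with
    | [] => simp [scanRuns, pvSpec, PySem.List.dedup_eq_ofList, PySem.Set.ofList_eq_foldl]
    | t :: rest =>
      have hsplit : rest.takeWhile (fun x => x == t) ++ rest.dropWhile (fun x => x == t) = rest :=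
        List.takeWhile_append_dropWhile
      have hpre : ∀ x ∈ rest.takeWhile (fun x => x == t), x = t := by
        intro x hx
        simpa using List.mem_takeWhile_imp hx
      have hple : (rest.dropWhile (fun x => x == t)).Pairwise (· ≤ ·) :=
        List.Pairwise.sublist (List.dropWhile_sublist _) (List.pairwise_cons.mp hp).2
      have htle : ∀ x ∈ rest, t ≤ x := (List.pairwise_cons.mp hp).1
      have hpost : t ∉ rest.dropWhile (fun x => x == t) := by
        intro hmem
        cases hd : rest.dropWhile (fun x => x == t) with
        | nil => rw [hd] at hmem; simp at hmem
        | cons h tl =>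
          have hh : (h == t) = false := by
            have := List.head_dropWhile_not (fun x => x == t) (l := rest) (by simp [hd])
            simpa [hd] using this
          have hht : h ≠ t := by simpa using hh
          rw [hd] at hmem
          rcases List.mem_cons.mp hmem with he | htl
          · exact hht he.symm
          · have hlt : t < h := lt_of_le_of_ne
              (htle h (by rw [← hsplit, hd]; exact List.mem_append_right _ (List.mem_cons_self)))
              (fun e => hht e.symm)
            have hle2 : h ≤ t := (List.pairwise_cons.mp (hd ▸ hple)).1 t htl
            exact absurd (lt_of_lt_of_le hlt hle2) (lt_irrefl t)
      have hlen : (rest.dropWhile (fun x => x == t)).length ≤ n := by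
        have h1 := List.length_dropWhile_le (fun x => x == t) rest
        have h2 : rest.length ≤ n := by simpa using hl
        omega
      have hcnt_t : (List.count t (t :: rest) : Int)
          = 1 + ((rest.takeWhile (fun x => x == t)).length : Int) := by
        have hnat : List.count t (t :: rest) = (rest.takeWhile (fun x => x == t)).length + 1 := by
          have ha : List.count t (rest.takeWhile (fun x => x == t))
              = (rest.takeWhile (fun x => x == t)).length :=
            List.count_eq_length.mpr (fun x hx => (hpre x hx).symm)
          have hb : List.count t (rest.dropWhile (fun x => x == t)) = 0 :=
            List.count_eq_zero.mpr hpost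
          rw [List.count_cons_self]
          conv_lhs => rw [← hsplit]
          rw [List.count_append, ha, hb]
        rw [hnat]
        push_cast
        ring
      have hcnt_k : ∀ k, k ≠ t →
          List.count k (t :: rest) = List.count k (rest.dropWhile (fun x => x == t)) := by
        intro k hk
        have h1 : List.count k (rest.takeWhile (fun x => x == t)) = 0 :=
          List.count_eq_zero.mpr (fun hm => hk (hpre k hm))
        rw [List.count_cons_of_ne (Ne.symm hk)]
        conv_lhs => rw [← hsplit]
        rw [List.count_append, h1, Nat.zero_add]
      have hdedup : PySem.List.dedup (t :: rest)
          = t :: PySem.List.dedup (rest.dropWhile (fun x => x == t)) := by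
        conv_lhs => rw [← hsplit]
        exact pv_dedup_run t _ _ hpre hpost
      have hknot : ∀ k ∈ PySem.List.dedup (rest.dropWhile (fun x => x == t)), k ≠ t := by
        intro k hk he
        have hm : k ∈ rest.dropWhile (fun x => x == t) := (PySem.List.mem_dedup _ k).mp hk
        exact hpost (he ▸ hm)
      rw [scanRuns]
      exact pv_scan_step t rest _ _ b w hcnt_k hdedup hcnt_t hknot
        (fun b' w' => ih _ hlen hple b' w')

lemma pv_scanRuns_spec (s : List String) (hs : s.Pairwise (· ≤ ·))
    (best : Int) (winners : List String) : scanRuns s best winners = pvSpec s best winners :=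
  pv_scanRuns_aux s.length s (Nat.le_refl _) hs best winners

-- A's per-size block appends exactly pvEmit of the string pool
lemma pv_blockA (orders : List String) (c : Int) (res : List String) :
    (let cnt := orders.foldl (fun cnt o =>
        if c ≤ PySem.Str.len o then pvCounterUpdate cnt (pvCombos o c) else cnt)
        PySem.Dict.empty
     let maxCount := (PySem.List.max? cnt.values (fun v => v)).getD 0
     if 1 < maxCount then
       res ++ (cnt.items.filter (fun kv => kv.2 == maxCount)).map (fun kv => String.ofList kv.1)
     else res) = res ++ pvEmit ((pvFlat orders c).map String.ofList) := by
  have hcnt : orders.foldl (fun cnt o =>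
      if c ≤ PySem.Str.len o then pvCounterUpdate cnt (pvCombos o c) else cnt)
      PySem.Dict.empty = PySem.Dict.counter (pvFlat orders c) := by
    rw [PySem.List.foldl_ite_eq_foldl_filter (p := fun o => c ≤ PySem.Str.len o)
      (f := fun cnt o => pvCounterUpdate cnt (pvCombos o c)) orders PySem.Dict.empty]
    rw [PySem.Dict.counter_eq_foldl]
    unfold pvFlat
    rw [List.foldl_flatMap]
    rfl
  have hvals : (PySem.Dict.counter (pvFlat orders c)).values
      = (PySem.List.dedup (pvFlat orders c)).map
          (fun k => (List.count k (pvFlat orders c) : Int)) := by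
    show ((PySem.Dict.counter (pvFlat orders c)).items).map Prod.snd = _
    rw [PySem.Dict.items_counter, List.map_map, ← PySem.List.dedup_eq_ofList]
    rfl
  have hmaxmap : pvMax ((pvFlat orders c).map String.ofList)
      = ((PySem.List.dedup (pvFlat orders c)).map
          (fun k => (List.count k (pvFlat orders c) : Int))).foldl max 0 := by
    unfold pvMax
    rw [pv_dedup_map, List.map_map]
    congr 1
    apply List.map_congr_left
    intro k _
    simp only [Function.comp_def]
    rw [List.count_map_of_injective _ _ pv_ofList_injective]
  have hmax : (PySem.List.max? ((PySem.List.dedup (pvFlat orders c)).map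
        (fun k => (List.count k (pvFlat orders c) : Int))) (fun v => v)).getD 0
      = pvMax ((pvFlat orders c).map String.ofList) := by
    rw [hmaxmap]
    cases hdd : (PySem.List.dedup (pvFlat orders c)).map
        (fun k => (List.count k (pvFlat orders c) : Int)) with
    | nil => rfl
    | cons x xs =>
      rw [PySem.List.max?_id_cons]
      have hx : (0 : Int) ≤ x := by
        have hxm : x ∈ (PySem.List.dedup (pvFlat orders c)).map
            (fun k => (List.count k (pvFlat orders c) : Int)) := by
          rw [hdd]; exact List.mem_cons_self
        rcases List.mem_map.mp hxm with ⟨k, _, he⟩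
        rw [← he]; exact Int.natCast_nonneg _
      simp [List.foldl_cons, max_eq_right hx]
  have hwin : ((PySem.Dict.counter (pvFlat orders c)).items.filter
        (fun kv => kv.2 == pvMax ((pvFlat orders c).map String.ofList))).map
        (fun kv => String.ofList kv.1)
      = pvWin ((pvFlat orders c).map String.ofList) := by
    rw [PySem.Dict.items_counter, List.filter_map, List.map_map]
    unfold pvWin
    rw [pv_dedup_map, List.filter_map, ← PySem.List.dedup_eq_ofList]
    simp only [Function.comp_def]
    congr 1
    apply List.filter_congr
    intro k _
    rw [List.count_map_of_injective _ _ pv_ofList_injective]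
  show (if 1 < (PySem.List.max? (orders.foldl (fun cnt o =>
      if c ≤ PySem.Str.len o then pvCounterUpdate cnt (pvCombos o c) else cnt)
      PySem.Dict.empty).values (fun v => v)).getD 0 then _ else _) = _
  rw [hcnt, hvals, hmax]
  unfold pvEmit
  split_ifs with h
  · rw [hwin]
  · simp

-- reading the final state of the scan off as pvEmit
lemma pv_spec_emit (s : List String) :
    (if 1 < (pvSpec s 0 []).1 then (pvSpec s 0 []).2 else []) = pvEmit s := by
  simp only [pvSpec, pvEmit, pvWin, pvMax]
  rw [ite_self, List.nil_append]

-- B's per-size block is a permutation of the same list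
lemma pv_blockB (orders : List String) (c : Int) :
    (pvEmitB orders c).Perm (pvEmit ((pvFlat orders c).map String.ofList)) := by
  have hpool : orders.foldl (fun pool o =>
      if c ≤ PySem.Str.len o then pool ++ (pvCombos o c).map String.ofList else pool) []
      = (pvFlat orders c).map String.ofList := by
    rw [PySem.List.foldl_ite_eq_foldl_filter (p := fun o => c ≤ PySem.Str.len o)
      (f := fun pool o => pool ++ (pvCombos o c).map String.ofList) orders []]
    rw [PySem.List.foldl_append_eq_flatMap]
    unfold pvFlat
    rw [List.map_flatMap]
    rfl
  have hs : (PySem.List.sorted ((pvFlat orders c).map String.ofList) (fun x => x) false).Pairwise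
      (· ≤ ·) := PySem.List.sorted_pairwise _ _
  have hperm : (PySem.List.sorted ((pvFlat orders c).map String.ofList) (fun x => x) false).Perm
      ((pvFlat orders c).map String.ofList) := PySem.List.sorted_perm _ _ _
  unfold pvEmitB
  dsimp only
  rw [hpool, pv_scanRuns_spec _ hs 0 [], pv_spec_emit]
  exact pv_emit_perm _ _ hperm

-- pointwise-permuting flatMap
lemma pv_flatMap_perm (course : List Int) (f g : Int → List String)
    (h : ∀ c, (f c).Perm (g c)) : (course.flatMap f).Perm (course.flatMap g) := by
  induction course with
  | nil => simp
  | cons c cs ih => simpa using (h c).append ih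

-- the two ports agree on every input (the ports themselves are total; Pre_ only
-- delimits where the Python programs return rather than raise)
lemma pv_main (orders : List String) (course : List Int) :
    solution orders course = solution_alt orders course := by
  unfold solution solution_alt
  rw [PySem.List.sorted_id_eq_sorted_id_iff_perm]
  have hA : course.foldl (fun res c =>
      let cnt := orders.foldl (fun cnt o =>
        if c ≤ PySem.Str.len o then pvCounterUpdate cnt (pvCombos o c) else cnt)
        PySem.Dict.empty
      let maxCount := (PySem.List.max? cnt.values (fun v => v)).getD 0
      if 1 < maxCount then
        res ++ (cnt.items.filter (fun kv => kv.2 == maxCount)).map (fun kv => String.ofList kv.1)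
      else res) []
      = course.flatMap (fun c => pvEmit ((pvFlat orders c).map String.ofList)) := by
    rw [PySem.List.foldl_congr_mem course _
      (fun res c => res ++ pvEmit ((pvFlat orders c).map String.ofList)) []
      (fun acc x _ => pv_blockA orders x acc)]
    rw [PySem.List.foldl_append_eq_flatMap]
    rfl
  have hB : course.foldl (fun res c =>
      let pool := orders.foldl (fun pool o =>
        if c ≤ PySem.Str.len o then pool ++ (pvCombos o c).map String.ofList else pool) []
      let spool := PySem.List.sorted pool (fun x => x) false
      let bw := scanRuns spool 0 []
      if 1 < bw.1 then res ++ bw.2 else res) []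
      = course.flatMap (fun c => pvEmitB orders c) := by
    rw [PySem.List.foldl_congr_mem course _
      (fun res c => res ++ pvEmitB orders c) []
      (fun acc x _ => by unfold pvEmitB; dsimp only; split_ifs <;> simp)]
    rw [PySem.List.foldl_append_eq_flatMap]
    rfl
  rw [hA, hB]
  exact (pv_flatMap_perm course _ _ (fun c => pv_blockB orders c)).symm

-- ===== VERDICT (by name: the statement is the Claim_ definition above) =====
theorem solution_spec : Claim_equal_solution :=
  fun orders course _ _ => pv_main orders course
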